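-- pv_equiv track=rewrite | github.com/Gagiwoo/LLM_PLAN | modules/doctrine_policy.py | _normalize_mission_sequence
-- ===== SOURCE A (Python) =====
-- from typing import Dict, List, Optional
--
-- DOCTRINE_ORDER = {"ISR": 0, "SEAD": 1, "STRIKE": 2, "CAS": 3}
--
-- def _normalize_mission_sequence(mission_types: List[str]) -> List[str]:
--     deduped = []
--     seen = set()
--     for m in mission_types:
--         if m not in seen:
--             deduped.append(m)
--             seen.add(m)
--     seq = sorted(deduped, key=lambda x: DOCTRINE_ORDER.get(x, 99))
--     if "STRIKE" in seq and "SEAD" not in seq: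
--         seq.insert(seq.index("STRIKE"), "SEAD")
--     return seq
-- ===== SOURCE B (Python) =====
-- from typing import Dict, List, Optional
--
-- DOCTRINE_ORDER = {"ISR": 0, "SEAD": 1, "STRIKE": 2, "CAS": 3}
--
-- def _normalize_mission_sequence(mission_types: List[str]) -> List[str]:
--     present = set()
--     unknown = []
--     seen_unknown = set()
--     for m in mission_types:
--         if m in DOCTRINE_ORDER:
--             present.add(m)
--         elif m not in seen_unknown:
--             unknown.append(m)
--             seen_unknown.add(m)
--     if "STRIKE" in present:
--         present.add("SEAD")
--     return [k for k in ("ISR", "SEAD", "STRIKE", "CAS") if k in present] + unknown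
-- ===== Notes on version B (the rewrite author's own statement) =====
-- stated objective: simpler
-- what changed: Replaces A's dedupe-then-stable-sort-then-positional-insert pipeline by a single collecting pass (presence set for known doctrine types, first-seen list of unknown ones) and emission along the fixed doctrine order, folding the SEAD rule into the presence set.
import Mathlib
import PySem

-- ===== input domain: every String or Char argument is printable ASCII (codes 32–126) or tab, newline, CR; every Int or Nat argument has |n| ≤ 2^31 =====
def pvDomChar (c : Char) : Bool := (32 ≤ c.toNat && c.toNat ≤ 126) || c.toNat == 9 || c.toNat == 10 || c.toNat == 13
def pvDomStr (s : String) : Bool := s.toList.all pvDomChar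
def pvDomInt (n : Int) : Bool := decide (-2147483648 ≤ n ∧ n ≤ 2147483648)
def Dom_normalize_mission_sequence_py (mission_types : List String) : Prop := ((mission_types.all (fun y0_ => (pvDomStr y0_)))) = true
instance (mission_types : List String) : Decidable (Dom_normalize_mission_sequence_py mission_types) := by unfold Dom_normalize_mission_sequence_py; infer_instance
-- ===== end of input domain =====

-- B replaces A's dedupe + stable sort + positional insert by a single collecting pass and
-- emission along the fixed doctrine order (objective: simpler).

-- ===== PORT A =====
-- DOCTRINE_ORDER = {"ISR": 0, "SEAD": 1, "STRIKE": 2, "CAS": 3}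
def pvDoctrineOrder : PySem.Dict String Int :=
  PySem.Dict.ofList [("ISR", 0), ("SEAD", 1), ("STRIKE", 2), ("CAS", 3)]

def normalize_mission_sequence_py (mission_types : List String) : List String :=
  -- deduped/seen loop
  let st := mission_types.foldl
    (fun (acc : List String × PySem.Set String) m =>
      if ¬ PySem.Set.contains acc.2 m then (acc.1 ++ [m], PySem.Set.add acc.2 m) else acc)
    ([], PySem.Set.empty)
  -- seq = sorted(deduped, key=lambda x: DOCTRINE_ORDER.get(x, 99))
  let seq := PySem.List.sorted st.1 (fun x => PySem.Dict.getD pvDoctrineOrder x 99)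
  if "STRIKE" ∈ seq ∧ "SEAD" ∉ seq then
    match PySem.List.index? seq "STRIKE" with
    | some i => PySem.List.insert seq (i : Int) "SEAD"
    | none => seq   -- unreachable: the guard guarantees "STRIKE" ∈ seq
  else seq

-- ===== PORT B =====
def pvKnownOrder : List String := ["ISR", "SEAD", "STRIKE", "CAS"]

def normalize_mission_sequence_py_alt (mission_types : List String) : List String :=
  let st := mission_types.foldl
    (fun (acc : PySem.Set String × List String × PySem.Set String) m =>
      if (PySem.Dict.get? pvDoctrineOrder m).isSome then (PySem.Set.add acc.1 m, acc.2.1, acc.2.2)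
      else if ¬ m ∈ acc.2.2 then (acc.1, acc.2.1 ++ [m], PySem.Set.add acc.2.2 m)
      else acc)
    (PySem.Set.empty, [], PySem.Set.empty)
  let present := if "STRIKE" ∈ st.1 then PySem.Set.add st.1 "SEAD" else st.1
  pvKnownOrder.filter (fun k => PySem.Set.contains present k) ++ st.2.1

-- ===== PRECONDITION & SPEC =====
def Spec_normalize_mission_sequence_py (mission_types : List String) (out : List String) : Prop := out = normalize_mission_sequence_py_alt mission_types
instance (mission_types : List String) (out : List String) : Decidable (Spec_normalize_mission_sequence_py mission_types out) := by unfold Spec_normalize_mission_sequence_py; infer_instance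

-- ===== CLAIM (what is proved, stated in full; the proofs are below) =====
def Claim_equal_normalize_mission_sequence_py : Prop := ∀ (mission_types : List String), Dom_normalize_mission_sequence_py mission_types → Spec_normalize_mission_sequence_py mission_types (normalize_mission_sequence_py mission_types)

-- ===== LEMMAS AND PROOFS =====

-- A's sort key and the two class predicates, named for the proofs
def pvKey (x : String) : Int := PySem.Dict.getD pvDoctrineOrder x 99
def pvKnw (y : String) : Bool := decide (y ∈ pvKnownOrder)
def pvUnk (y : String) : Bool := decide (y ∉ pvKnownOrder)

theorem pvKey_ISR : pvKey "ISR" = 0 := by decide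
theorem pvKey_SEAD : pvKey "SEAD" = 1 := by decide
theorem pvKey_STRIKE : pvKey "STRIKE" = 2 := by decide
theorem pvKey_CAS : pvKey "CAS" = 3 := by decide
theorem pvUnk_ISR : pvUnk "ISR" = false := by decide
theorem pvUnk_SEAD : pvUnk "SEAD" = false := by decide
theorem pvUnk_STRIKE : pvUnk "STRIKE" = false := by decide
theorem pvUnk_CAS : pvUnk "CAS" = false := by decide

theorem pvItems : pvDoctrineOrder.items = [("ISR", 0), ("SEAD", 1), ("STRIKE", 2), ("CAS", 3)] := by
  decide

theorem pvKey_unknown {x : String} (h : x ∉ pvKnownOrder) : pvKey x = 99 := by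
  simp [pvKnownOrder] at h
  obtain ⟨n1, n2, n3, n4⟩ := h
  have g1 : ("ISR" == x) = false := beq_eq_false_iff_ne.mpr (Ne.symm n1)
  have g2 : ("SEAD" == x) = false := beq_eq_false_iff_ne.mpr (Ne.symm n2)
  have g3 : ("STRIKE" == x) = false := beq_eq_false_iff_ne.mpr (Ne.symm n3)
  have g4 : ("CAS" == x) = false := beq_eq_false_iff_ne.mpr (Ne.symm n4)
  simp [pvKey, PySem.Dict.getD, PySem.Dict.get?, pvItems, List.find?, g1, g2, g3, g4]

theorem pvKey_le (x : String) : pvKey x ≤ 99 := by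
  by_cases h : x ∈ pvKnownOrder
  · simp [pvKnownOrder] at h
    rcases h with rfl | rfl | rfl | rfl <;> decide
  · rw [pvKey_unknown h]

theorem pvKnown_isSome (m : String) :
    (PySem.Dict.get? pvDoctrineOrder m).isSome = decide (m ∈ pvKnownOrder) := by
  by_cases h1 : m = "ISR"
  · subst h1; decide
  by_cases h2 : m = "SEAD"
  · subst h2; decide
  by_cases h3 : m = "STRIKE"
  · subst h3; decide
  by_cases h4 : m = "CAS"
  · subst h4; decide
  have g1 : ("ISR" == m) = false := beq_eq_false_iff_ne.mpr (Ne.symm h1)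
  have g2 : ("SEAD" == m) = false := beq_eq_false_iff_ne.mpr (Ne.symm h2)
  have g3 : ("STRIKE" == m) = false := beq_eq_false_iff_ne.mpr (Ne.symm h3)
  have g4 : ("CAS" == m) = false := beq_eq_false_iff_ne.mpr (Ne.symm h4)
  simp [PySem.Dict.get?, pvItems, List.find?, pvKnownOrder, g1, g2, g3, g4, h1, h2, h3, h4]

-- inserting a known element in front of an all-unknown tail
theorem pvInsertBy_tail (x : String) (u : List String) (hx : pvKey x < 99)
    (hu : ∀ y ∈ u, y ∉ pvKnownOrder) :
    PySem.List.insertBy (fun a b => decide (pvKey a < pvKey b)) x u = x :: u := by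
  cases u with
  | nil => rfl
  | cons y t =>
      have hy : pvKey y = 99 := pvKey_unknown (hu y (by simp))
      simp [PySem.List.insertBy, hy, hx]

-- characterisation of A's stable insertion sort on a duplicate-free list:
-- the known types in doctrine order, then the unknown ones in list order
theorem pvFoldl_char (q : List String) (hq : q.Nodup) :
    q.foldl (fun acc x => PySem.List.insertBy (fun a b => decide (pvKey a < pvKey b)) x acc) [] =
      pvKnownOrder.filter (fun k => decide (k ∈ q)) ++ q.filter pvUnk := by
  induction q using List.reverseRecOn with
  | nil => rfl
  | append_singleton t x ih =>
      have ht : t.Nodup := (List.nodup_append.mp hq).1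
      have hxt : x ∉ t := by
        intro hmem
        exact List.disjoint_of_nodup_append hq hmem (List.mem_singleton_self x)
      rw [List.foldl_append, List.foldl_cons, List.foldl_nil, ih ht]
      have hu : ∀ y ∈ t.filter pvUnk, y ∉ pvKnownOrder := by
        intro y hy
        have := List.of_mem_filter hy
        simpa [pvUnk] using this
      by_cases hx : x ∈ pvKnownOrder
      · simp only [pvKnownOrder, List.mem_cons, List.not_mem_nil, or_false] at hx
        have hx99 : pvKey x < 99 := by
          rcases hx with rfl | rfl | rfl | rfl <;> decide
        have htail := pvInsertBy_tail x _ hx99 hu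
        rcases hx with rfl | rfl | rfl | rfl <;>
        · by_cases h1 : "ISR" ∈ t <;> by_cases h2 : "SEAD" ∈ t <;>
          by_cases h3 : "STRIKE" ∈ t <;> by_cases h4 : "CAS" ∈ t <;>
          first
          | (exact absurd ‹_› hxt)
          | (simp [pvKnownOrder, List.filter_append, h1, h2, h3, h4,
               PySem.List.insertBy, pvKey_ISR, pvKey_SEAD, pvKey_STRIKE, pvKey_CAS,
               pvUnk_ISR, pvUnk_SEAD, pvUnk_STRIKE, pvUnk_CAS, htail])
      · have hk : ∀ y ∈ pvKnownOrder.filter (fun k => decide (k ∈ t)) ++ t.filter pvUnk,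
            (fun a b => decide (pvKey a < pvKey b)) x y = false := by
          intro y _
          simp only [decide_eq_false_iff_not, not_lt]
          rw [pvKey_unknown hx]
          exact pvKey_le y
        rw [PySem.List.insertBy_of_forall_not_before _ _ _ hk]
        have hne : ∀ k ∈ pvKnownOrder, k ≠ x := fun k hk' heq => hx (heq ▸ hk')
        have hf : pvKnownOrder.filter (fun k => decide (k ∈ t ++ [x])) =
            pvKnownOrder.filter (fun k => decide (k ∈ t)) := by
          apply List.filter_congr
          intro k hk'
          simp [List.mem_append, hne k hk']
        rw [hf, List.filter_append, List.filter_cons]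
        simp [pvUnk, hx]

-- A's dedupe loop: both accumulators stay equal and build set(xs) in first-seen order
theorem pvDedupe_fold (l : List String) (s : PySem.Set String) :
    l.foldl
      (fun (acc : List String × PySem.Set String) m =>
        if ¬ PySem.Set.contains acc.2 m then (acc.1 ++ [m], PySem.Set.add acc.2 m) else acc)
      (s, s) = (l.foldl PySem.Set.add s, l.foldl PySem.Set.add s) := by
  induction l generalizing s with
  | nil => rfl
  | cons m t ih =>
      simp only [List.foldl_cons]
      by_cases h : m ∈ s
      · simpa [PySem.Set.add, h] using ih s
      · simpa [PySem.Set.add, h] using ih (s ++ [m])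

theorem pvDedupe_fold0 (l : List String) :
    l.foldl
      (fun (acc : List String × PySem.Set String) m =>
        if ¬ PySem.Set.contains acc.2 m then (acc.1 ++ [m], PySem.Set.add acc.2 m) else acc)
      ([], PySem.Set.empty) = (PySem.Set.ofList l, PySem.Set.ofList l) := by
  rw [show (([] : List String), PySem.Set.empty) =
      ((PySem.Set.empty : PySem.Set String), (PySem.Set.empty : PySem.Set String)) from rfl,
    pvDedupe_fold]
  rfl

-- dedup commutes with filter
theorem pvOfList_append (t : List String) (y : String) :
    PySem.Set.ofList (t ++ [y]) = PySem.Set.add (PySem.Set.ofList t) y := by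
  simp [PySem.Set.ofList_eq_foldl, List.foldl_append]

theorem pvOfList_filter (P : String → Bool) (l : List String) :
    PySem.Set.ofList (l.filter P) = (PySem.Set.ofList l).filter P := by
  induction l using List.reverseRecOn with
  | nil => rfl
  | append_singleton q x ih =>
      rw [List.filter_append, pvOfList_append]
      by_cases hP : P x
      · simp only [List.filter_cons, hP, if_true, List.filter_nil]
        rw [pvOfList_append, ih]
        by_cases hx : x ∈ q
        · simp [PySem.Set.add, hx, hP]
        · simp [PySem.Set.add, hx, List.filter_append, hP]
      · rw [show List.filter P [x] = [] by simp [hP]]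
        rw [List.append_nil, ih]
        simp only [PySem.Set.add]
        split_ifs
        · rfl
        · simp [List.filter_append, hP]

-- B's unknown-deduping sub-loop: list and seen-set stay equal
theorem pvUnkDedupe_fold (l : List String) (s : PySem.Set String) :
    l.foldl
      (fun (uu : List String × PySem.Set String) m =>
        if ¬ m ∈ uu.2 then (uu.1 ++ [m], PySem.Set.add uu.2 m) else uu)
      (s, s) = (l.foldl PySem.Set.add s, l.foldl PySem.Set.add s) := by
  induction l generalizing s with
  | nil => rfl
  | cons m t ih =>
      simp only [List.foldl_cons]
      by_cases h : m ∈ s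
      · simpa [PySem.Set.add, h] using ih s
      · simpa [PySem.Set.add, h] using ih (s ++ [m])

-- B's collecting loop split into its two independent accumulators
theorem pvCollect_fold (l : List String) :
    l.foldl
      (fun (acc : PySem.Set String × List String × PySem.Set String) m =>
        if (PySem.Dict.get? pvDoctrineOrder m).isSome then (PySem.Set.add acc.1 m, acc.2.1, acc.2.2)
        else if ¬ m ∈ acc.2.2 then (acc.1, acc.2.1 ++ [m], PySem.Set.add acc.2.2 m)
        else acc)
      (PySem.Set.empty, [], PySem.Set.empty) =
      (PySem.Set.ofList (l.filter pvKnw),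
       PySem.Set.ofList (l.filter pvUnk), PySem.Set.ofList (l.filter pvUnk)) := by
  have hstep : (fun (acc : PySem.Set String × List String × PySem.Set String) m =>
        if (PySem.Dict.get? pvDoctrineOrder m).isSome then (PySem.Set.add acc.1 m, acc.2.1, acc.2.2)
        else if ¬ m ∈ acc.2.2 then (acc.1, acc.2.1 ++ [m], PySem.Set.add acc.2.2 m)
        else acc) =
      (fun (acc : PySem.Set String × List String × PySem.Set String) m =>
        ((fun p x => if pvKnw x then PySem.Set.add p x else p) acc.1 m,
         (fun (uu : List String × PySem.Set String) x =>
            if pvUnk x then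
              (if ¬ x ∈ uu.2 then (uu.1 ++ [x], PySem.Set.add uu.2 x) else uu)
            else uu) acc.2 m)) := by
    funext acc m
    rw [pvKnown_isSome]
    by_cases h : m ∈ pvKnownOrder
    · simp [pvKnw, pvUnk, h]
    · simp only [pvKnw, pvUnk, h, decide_true, decide_false, not_false_iff,
        if_false, if_true, Bool.false_eq_true]
      by_cases hm : m ∈ acc.2.2
      · simp [hm]
      · simp [hm]
  rw [hstep, PySem.List.foldl_prod_mk
      (f := fun p x => if pvKnw x then PySem.Set.add p x else p)
      (g := fun (uu : List String × PySem.Set String) x =>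
        if pvUnk x then
          (if ¬ x ∈ uu.2 then (uu.1 ++ [x], PySem.Set.add uu.2 x) else uu)
        else uu),
    PySem.List.foldl_if_eq_foldl_filter, PySem.List.foldl_if_eq_foldl_filter]
  rw [show (([] : List String), (PySem.Set.empty : PySem.Set String)) =
      ((PySem.Set.empty : PySem.Set String), (PySem.Set.empty : PySem.Set String)) from rfl,
    pvUnkDedupe_fold]
  rfl

-- ===== VERDICT (by name: the statement is the Claim_ definition above) =====
theorem normalize_mission_sequence_py_spec : Claim_equal_normalize_mission_sequence_py := by
  intro l _
  unfold Spec_normalize_mission_sequence_py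
  unfold normalize_mission_sequence_py normalize_mission_sequence_py_alt
  rw [pvDedupe_fold0, pvCollect_fold]
  rw [show (fun x => PySem.Dict.getD pvDoctrineOrder x 99) = pvKey from rfl]
  simp only []
  have hsorted : PySem.List.sorted (PySem.Set.ofList l) pvKey =
      pvKnownOrder.filter (fun k => decide (k ∈ PySem.Set.ofList l)) ++
        (PySem.Set.ofList l).filter pvUnk := by
    rw [PySem.List.sorted_eq_foldl_insertBy]
    exact pvFoldl_char _ (PySem.Set.nodup_ofList l)
  have hkf : pvKnownOrder.filter (fun k => decide (k ∈ PySem.Set.ofList l)) =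
      pvKnownOrder.filter (fun k => decide (k ∈ l)) := by
    apply List.filter_congr
    intro k _
    simp [PySem.Set.mem_ofList]
  have hufil : (PySem.Set.ofList l).filter pvUnk = PySem.Set.ofList (l.filter pvUnk) :=
    (pvOfList_filter pvUnk l).symm
  rw [hsorted, hkf, hufil]
  have hSU : "STRIKE" ∉ PySem.Set.ofList (l.filter pvUnk) := by
    simp [PySem.Set.mem_ofList, List.mem_filter, pvUnk_STRIKE]
  have hSEU : "SEAD" ∉ PySem.Set.ofList (l.filter pvUnk) := by
    simp [PySem.Set.mem_ofList, List.mem_filter, pvUnk_SEAD]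
  have hSkf : "STRIKE" ∈ pvKnownOrder.filter (fun k => decide (k ∈ l)) ↔ "STRIKE" ∈ l := by
    simp [List.mem_filter, pvKnownOrder]
  have hSEkf : "SEAD" ∈ pvKnownOrder.filter (fun k => decide (k ∈ l)) ↔ "SEAD" ∈ l := by
    simp [List.mem_filter, pvKnownOrder]
  have hSP : "STRIKE" ∈ PySem.Set.ofList (l.filter pvKnw) ↔ "STRIKE" ∈ l := by
    simp [PySem.Set.mem_ofList, List.mem_filter, pvKnw, pvKnownOrder]
  have hSEP : "SEAD" ∈ PySem.Set.ofList (l.filter pvKnw) ↔ "SEAD" ∈ l := by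
    simp [PySem.Set.mem_ofList, List.mem_filter, pvKnw, pvKnownOrder]
  by_cases hS : "STRIKE" ∈ l
  · by_cases hSE : "SEAD" ∈ l
    · -- SEAD already present: no insertion on either side
      rw [if_neg (by simp [List.mem_append, hSEkf, hSE]), if_pos (hSP.mpr hS),
        show PySem.Set.add (PySem.Set.ofList (l.filter pvKnw)) "SEAD" =
            PySem.Set.ofList (l.filter pvKnw) by
          simp [PySem.Set.add, PySem.Set.contains, hSEP.mpr hSE]]
      congr 1
      apply List.filter_congr
      intro k hk
      simp only [pvKnownOrder, List.mem_cons, List.not_mem_nil, or_false] at hk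
      rcases hk with rfl | rfl | rfl | rfl <;>
        simp [PySem.Set.contains, PySem.Set.mem_ofList, List.mem_filter, pvKnw, pvKnownOrder]
    · -- STRIKE present, SEAD absent: A inserts SEAD before STRIKE, B emits it at its slot
      rw [if_pos ⟨List.mem_append.mpr (Or.inl (hSkf.mpr hS)), by
          simp [List.mem_append, hSEkf, hSE, hSEU]⟩,
        if_pos (hSP.mpr hS),
        PySem.List.index?_append_of_mem _ (hSkf.mpr hS),
        show PySem.Set.add (PySem.Set.ofList (l.filter pvKnw)) "SEAD" =
            PySem.Set.ofList (l.filter pvKnw) ++ ["SEAD"] by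
          simp [PySem.Set.add, PySem.Set.contains, hSEP, hSE]]
      have hfB : pvKnownOrder.filter
            (fun k => PySem.Set.contains (PySem.Set.ofList (l.filter pvKnw) ++ ["SEAD"]) k) =
          pvKnownOrder.filter (fun k => decide (k ∈ l ∨ k = "SEAD")) := by
        apply List.filter_congr
        intro k hk
        simp only [pvKnownOrder, List.mem_cons, List.not_mem_nil, or_false] at hk
        rcases hk with rfl | rfl | rfl | rfl <;>
          simp [PySem.Set.contains, List.mem_append, PySem.Set.mem_ofList, List.mem_filter,
            pvKnw, pvKnownOrder]
      rw [hfB]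
      by_cases hI : "ISR" ∈ l <;> by_cases hC : "CAS" ∈ l
      · rw [show pvKnownOrder.filter (fun k => decide (k ∈ l)) = ["ISR", "STRIKE", "CAS"] by
            simp [pvKnownOrder, hI, hS, hSE, hC],
          show PySem.List.index? ["ISR", "STRIKE", "CAS"] "STRIKE" = some 1 from by decide]
        rw [show pvKnownOrder.filter (fun k => decide (k ∈ l ∨ k = "SEAD")) =
            ["ISR", "SEAD", "STRIKE", "CAS"] by simp [pvKnownOrder, hI, hS, hC]]
        simp only [List.cons_append, Nat.cast_one]
        rw [PySem.List.insert_ofNat _ 1 _ (by simp)]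
        simp
      · rw [show pvKnownOrder.filter (fun k => decide (k ∈ l)) = ["ISR", "STRIKE"] by
            simp [pvKnownOrder, hI, hS, hSE, hC],
          show PySem.List.index? ["ISR", "STRIKE"] "STRIKE" = some 1 from by decide]
        rw [show pvKnownOrder.filter (fun k => decide (k ∈ l ∨ k = "SEAD")) =
            ["ISR", "SEAD", "STRIKE"] by simp [pvKnownOrder, hI, hS, hC]]
        simp only [List.cons_append, Nat.cast_one]
        rw [PySem.List.insert_ofNat _ 1 _ (by simp)]
        simp
      · rw [show pvKnownOrder.filter (fun k => decide (k ∈ l)) = ["STRIKE", "CAS"] by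
            simp [pvKnownOrder, hI, hS, hSE, hC],
          show PySem.List.index? ["STRIKE", "CAS"] "STRIKE" = some 0 from by decide]
        rw [show pvKnownOrder.filter (fun k => decide (k ∈ l ∨ k = "SEAD")) =
            ["SEAD", "STRIKE", "CAS"] by simp [pvKnownOrder, hI, hS, hC]]
        simp only [List.cons_append, Nat.cast_zero]
        rw [PySem.List.insert_zero]
      · rw [show pvKnownOrder.filter (fun k => decide (k ∈ l)) = ["STRIKE"] by
            simp [pvKnownOrder, hI, hS, hSE, hC],
          show PySem.List.index? ["STRIKE"] "STRIKE" = some 0 from by decide]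
        rw [show pvKnownOrder.filter (fun k => decide (k ∈ l ∨ k = "SEAD")) =
            ["SEAD", "STRIKE"] by simp [pvKnownOrder, hI, hS, hC]]
        simp only [List.cons_append, Nat.cast_zero]
        rw [PySem.List.insert_zero]
  · -- STRIKE absent: no insertion on either side
    rw [if_neg (by simp [List.mem_append, hSkf, hS, hSU]), if_neg (by simp [hSP, hS])]
    congr 1
    apply List.filter_congr
    intro k hk
    simp only [pvKnownOrder, List.mem_cons, List.not_mem_nil, or_false] at hk
    rcases hk with rfl | rfl | rfl | rfl <;>
      simp [PySem.Set.contains, PySem.Set.mem_ofList, List.mem_filter, pvKnw, pvKnownOrder]
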